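-- pv_equiv track=rewrite | github.com/trustup/vtestbed | project/operations.py | number_of_members
-- ===== SOURCE A (Python) =====
-- def number_of_members(members_not_format):
--     # elements for each network (only for members, because there is only one firewall for each ; )
--     members = members_not_format.replace(" ", "").split(";")
--     len_str = len(members)
--     elements = []
--     for x in range(len_str):
--         add = members[x].replace(" ", "").split(",")
--         elements.append(len(add))
--     return elements
-- ===== SOURCE B (Python) =====
-- def number_of_members(members_not_format):
--     counts = [1]
--     for c in members_not_format:
--         if c == ';':
--             counts.append(1)
--         elif c == ',':
--             counts[-1] += 1
--     return counts
-- ===== Notes on version B (the rewrite author's own statement) =====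
-- stated objective: alternative
-- what changed: B replaces A's strip-spaces/split-per-network/split-and-count pipeline by a single character-level pass over the original string that keeps a running list of counts, starting a new count at each semicolon and incrementing the last count at each comma.
import Mathlib
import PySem

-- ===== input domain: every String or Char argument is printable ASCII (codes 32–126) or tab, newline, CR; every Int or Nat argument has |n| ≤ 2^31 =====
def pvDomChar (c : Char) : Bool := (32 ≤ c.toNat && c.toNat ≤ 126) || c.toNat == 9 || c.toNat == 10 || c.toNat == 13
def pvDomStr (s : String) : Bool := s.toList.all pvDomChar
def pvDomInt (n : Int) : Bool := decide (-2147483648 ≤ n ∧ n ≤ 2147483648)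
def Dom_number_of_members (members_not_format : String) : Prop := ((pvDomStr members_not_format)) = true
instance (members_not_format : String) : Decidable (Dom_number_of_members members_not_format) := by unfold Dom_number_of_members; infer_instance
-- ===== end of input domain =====

-- B replaces A's strip-spaces/split/split-and-count pipeline by one character-level pass counting delimiters (objective: alternative decomposition).

-- ===== PORT A =====
-- A, transliterated on List Char: members = s.replace(" ","").split(";"); for x in range(len(members)): append len(members[x].replace(" ","").split(","))
def number_of_members (members_not_format : String) : List Int :=
  let members := PySem.Chars.splitOn (PySem.Chars.replace members_not_format.toList [' '] []) [';']
  let len_str := PySem.List.len members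
  (PySem.List.pyRange 0 len_str).foldl
    (fun elements x =>
      let add := PySem.Chars.splitOn (PySem.Chars.replace (PySem.List.pyGetD members x []) [' '] []) [',']
      elements ++ [PySem.List.len add]) []

-- ===== PORT B =====
-- counts[-1] += 1 on a nonempty list
def bumpLast : List Int → List Int
  | [] => []
  | [x] => [x + 1]
  | x :: y :: xs => x :: bumpLast (y :: xs)

def number_of_members_alt (members_not_format : String) : List Int :=
  members_not_format.toList.foldl
    (fun counts c =>
      if c = ';' then counts ++ [1]
      else if c = ',' then bumpLast counts
      else counts) [1]

-- ===== PRECONDITION & SPEC =====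
def Spec_number_of_members (members_not_format : String) (out : List Int) : Prop := out = number_of_members_alt members_not_format
instance (members_not_format : String) (out : List Int) : Decidable (Spec_number_of_members members_not_format out) := by unfold Spec_number_of_members; infer_instance

-- ===== CLAIM (what is proved, stated in full; the proofs are below) =====
def Claim_equal_number_of_members : Prop := ∀ (members_not_format : String), Dom_number_of_members members_not_format → Spec_number_of_members members_not_format (number_of_members members_not_format)

-- ===== LEMMAS AND PROOFS =====

-- simple recursive model of splitting on a single separator character
def mySplit (sep : Char) : List Char → List (List Char)
  | [] => [[]]
  | c :: t => if c = sep then [] :: mySplit sep t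
              else match mySplit sep t with
                   | [] => [[c]]
                   | h :: r => (c :: h) :: r

theorem mySplit_ne_nil (sep : Char) (l : List Char) : mySplit sep l ≠ [] := by
  cases l with
  | nil => simp [mySplit]
  | cons c t =>
    simp only [mySplit]
    split
    · simp
    · split <;> simp

-- prepend a prefix onto the first piece
def consOnto (p : List Char) : List (List Char) → List (List Char)
  | [] => [p]
  | h :: r => (p ++ h) :: r

theorem replace_go_filter (fuel : Nat) (l acc : List Char) (h : l.length ≤ fuel) :
    PySem.Chars.replace.go [' '] [] fuel l acc
      = acc.reverse ++ l.filter (fun c => !(c == ' ')) := by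
  induction fuel generalizing l acc with
  | zero =>
    have : l = [] := by cases l <;> simp_all
    subst this; simp [PySem.Chars.replace.go]
  | succ n ih =>
    cases l with
    | nil => simp [PySem.Chars.replace.go]
    | cons c t =>
      simp only [PySem.Chars.replace.go, List.isPrefixOf]
      by_cases hc : c = ' '
      · subst hc
        simp only [beq_self_eq_true, Bool.true_and, if_true, List.length_singleton,
          List.drop_succ_cons, List.drop_zero, List.reverse_nil, List.nil_append]
        rw [ih t acc (by simpa using Nat.le_of_succ_le_succ h)]
        simp
      · have hb : ((' ' == c) && true) = false := by
          simp only [Bool.and_true, beq_eq_false_iff_ne, ne_eq]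
          exact fun e => hc e.symm
        simp only [hb, Bool.false_eq_true, if_false]
        rw [ih t (c :: acc) (by simpa using Nat.le_of_succ_le_succ h)]
        simp [hc]

theorem replace_space_eq_filter (l : List Char) :
    PySem.Chars.replace l [' '] [] = l.filter (fun c => !(c == ' ')) := by
  simp only [PySem.Chars.replace, List.isEmpty_cons]
  simpa using replace_go_filter l.length l [] le_rfl

theorem splitOn_go_mySplit (sep : Char) (fuel : Nat) (l cur : List Char)
    (acc : List (List Char)) (h : l.length ≤ fuel) :
    PySem.Chars.splitOn.go [sep] fuel l cur acc
      = acc.reverse ++ consOnto cur.reverse (mySplit sep l) := by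
  induction fuel generalizing l cur acc with
  | zero =>
    have : l = [] := by cases l <;> simp_all
    subst this; simp [PySem.Chars.splitOn.go, mySplit, consOnto]
  | succ n ih =>
    cases l with
    | nil => simp [PySem.Chars.splitOn.go, mySplit, consOnto]
    | cons c t =>
      simp only [PySem.Chars.splitOn.go, List.isPrefixOf]
      by_cases hc : c = sep
      · subst hc
        simp only [beq_self_eq_true, Bool.true_and, if_true, List.length_singleton,
          List.drop_succ_cons, List.drop_zero]
        rw [ih t [] (cur.reverse :: acc) (by simpa using Nat.le_of_succ_le_succ h)]
        obtain ⟨hh, r, hr⟩ : ∃ hh r, mySplit c t = hh :: r := by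
          cases hm : mySplit c t with
          | nil => exact absurd hm (mySplit_ne_nil c t)
          | cons a b => exact ⟨a, b, rfl⟩
        simp [mySplit, hr, consOnto]
      · have hb : ((sep == c) && true) = false := by
          simp only [Bool.and_true, beq_eq_false_iff_ne, ne_eq]
          exact fun e => hc e.symm
        simp only [hb, Bool.false_eq_true, if_false]
        rw [ih t (c :: cur) acc (by simpa using Nat.le_of_succ_le_succ h)]
        obtain ⟨hh, r, hr⟩ : ∃ hh r, mySplit sep t = hh :: r := by
          cases hm : mySplit sep t with
          | nil => exact absurd hm (mySplit_ne_nil sep t)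
          | cons a b => exact ⟨a, b, rfl⟩
        simp [mySplit, hc, hr, consOnto]

theorem splitOn_eq_mySplit (sep : Char) (l : List Char) :
    PySem.Chars.splitOn l [sep] = mySplit sep l := by
  simp only [PySem.Chars.splitOn]
  rw [splitOn_go_mySplit sep (l.length + 1) l [] [] (Nat.le_succ _)]
  obtain ⟨hh, r, hr⟩ : ∃ hh r, mySplit sep l = hh :: r := by
    cases hm : mySplit sep l with
    | nil => exact absurd hm (mySplit_ne_nil sep l)
    | cons a b => exact ⟨a, b, rfl⟩
  simp [hr, consOnto]

-- every character of a split piece comes from the original list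
theorem mem_mySplit_mem (sep : Char) (l m : List Char) (hm : m ∈ mySplit sep l)
    (x : Char) (hx : x ∈ m) : x ∈ l := by
  induction l generalizing m with
  | nil => simp [mySplit] at hm; subst hm; simp at hx
  | cons c t ih =>
    simp only [mySplit] at hm
    by_cases hc : c = sep
    · rw [if_pos hc] at hm
      rcases List.mem_cons.mp hm with h | h
      · subst h; simp at hx
      · exact List.mem_cons_of_mem _ (ih m h hx)
    · rw [if_neg hc] at hm
      cases hs : mySplit sep t with
      | nil => exact absurd hs (mySplit_ne_nil sep t)
      | cons hh r =>
        rw [hs] at hm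
        rcases List.mem_cons.mp hm with h | h
        · subst h
          rcases List.mem_cons.mp hx with h | h
          · exact h ▸ List.mem_cons_self
          · exact List.mem_cons_of_mem _ (ih hh (by simp [hs]) h)
        · exact List.mem_cons_of_mem _ (ih m (by simp [hs, h]) hx)

-- A's loop over range(len(members)) appends, i.e. maps
theorem foldl_append_map {α : Type} (f : α → Int) (xs : List α) (acc : List Int) :
    xs.foldl (fun a x => a ++ [f x]) acc = acc ++ xs.map f := by
  induction xs generalizing acc with
  | nil => simp
  | cons x t ih => simp [List.foldl_cons, ih, List.append_assoc]

-- the running-count model of B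
def gRun (n : Int) : List Char → List Int
  | [] => [n]
  | c :: t => if c = ';' then n :: gRun 1 t
              else if c = ',' then gRun (n + 1) t
              else gRun n t

theorem bumpLast_append (init : List Int) (n : Int) :
    bumpLast (init ++ [n]) = init ++ [n + 1] := by
  induction init with
  | nil => simp [bumpLast]
  | cons a t ih =>
    cases t with
    | nil => simp [bumpLast]
    | cons b t' => simpa [bumpLast] using ih

theorem foldl_step_gRun (l : List Char) (init : List Int) (n : Int) :
    l.foldl (fun counts c =>
        if c = ';' then counts ++ [1]
        else if c = ',' then bumpLast counts
        else counts) (init ++ [n])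
      = init ++ gRun n l := by
  induction l generalizing init n with
  | nil => simp [gRun]
  | cons c t ih =>
    simp only [List.foldl_cons]
    by_cases h1 : c = ';'
    · subst h1
      simp only [if_true, gRun]
      rw [show (init ++ [n]) ++ [1] = (init ++ [n]) ++ [(1 : Int)] from rfl]
      rw [ih (init ++ [n]) 1]
      simp
    · by_cases h2 : c = ','
      · subst h2
        simp only [if_neg (by decide : (',' : Char) ≠ ';'), if_true, gRun, bumpLast_append]
        rw [ih init (n + 1)]
      · simp [h1, h2, gRun, ih init n]

-- spaces are ignored by the running count
theorem gRun_filter_space (l : List Char) (n : Int) :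
    gRun n (l.filter (fun c => !(c == ' '))) = gRun n l := by
  induction l generalizing n with
  | nil => rfl
  | cons c t ih =>
    by_cases hc : c = ' '
    · subst hc; simp [List.filter, gRun, ih]
    · simp only [List.filter]
      have hb : (!(c == ' ')) = true := by simp [hc]
      rw [hb]
      simp only [gRun]
      split_ifs <;> simp [ih]

def addFirst (k : Int) : List Int → List Int
  | [] => []
  | x :: xs => (x + k) :: xs

-- the running count equals the per-network piece counts of the split
theorem gRun_eq_split (l : List Char) (n : Int) :
    gRun n l = addFirst (n - 1) ((mySplit ';' l).map (fun m => PySem.List.len (mySplit ',' m))) := by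
  induction l generalizing n with
  | nil =>
    simp only [gRun, mySplit, List.map_cons, List.map_nil, addFirst, PySem.List.len,
      List.length_cons, List.length_nil]
    congr 1
    omega
  | cons c t ih =>
    by_cases h1 : c = ';'
    · subst h1
      simp only [gRun, if_true, mySplit, List.map_cons, addFirst]
      rw [ih 1]
      obtain ⟨hh, r, hr⟩ : ∃ hh r, mySplit ';' t = hh :: r := by
        cases hm : mySplit ';' t with
        | nil => exact absurd hm (mySplit_ne_nil ';' t)
        | cons a b => exact ⟨a, b, rfl⟩
      simp [hr, addFirst, PySem.List.len]
    · obtain ⟨hh, r, hr⟩ : ∃ hh r, mySplit ';' t = hh :: r := by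
        cases hm : mySplit ';' t with
        | nil => exact absurd hm (mySplit_ne_nil ';' t)
        | cons a b => exact ⟨a, b, rfl⟩
      obtain ⟨p, q, hpq⟩ : ∃ p q, mySplit ',' hh = p :: q := by
        cases hm : mySplit ',' hh with
        | nil => exact absurd hm (mySplit_ne_nil ',' hh)
        | cons a b => exact ⟨a, b, rfl⟩
      by_cases h2 : c = ','
      · subst h2
        simp only [gRun, if_neg (by decide : (',' : Char) ≠ ';'), if_true]
        rw [ih (n + 1)]
        simp only [mySplit, if_neg h1, hr, List.map_cons, addFirst, PySem.List.len, hpq,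
          List.length_cons, if_true]
        congr 1
        omega
      · simp only [gRun, if_neg h1, if_neg h2]
        rw [ih n]
        simp only [mySplit, if_neg h1, if_neg h2, hr, hpq, List.map_cons, addFirst,
          PySem.List.len, List.length_cons]

-- ===== VERDICT (by name: the statement is the Claim_ definition above) =====
theorem number_of_members_spec : Claim_equal_number_of_members := by
  intro s _
  unfold Spec_number_of_members number_of_members number_of_members_alt
  set lf := s.toList.filter (fun c => !(c == ' ')) with hlf
  have hA1 : PySem.Chars.replace s.toList [' '] [] = lf := replace_space_eq_filter s.toList
  rw [hA1, splitOn_eq_mySplit]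
  rw [PySem.List.foldl_pyRange_pyGetD (mySplit ';' lf) ([] : List Char)
        (fun elements m => elements ++ [PySem.List.len (PySem.Chars.splitOn (PySem.Chars.replace m [' '] []) [','])])
        [] le_rfl]
  simp only [Int.toNat_zero, List.drop_zero]
  rw [foldl_append_map]
  have hmap : (mySplit ';' lf).map
        (fun m => PySem.List.len (PySem.Chars.splitOn (PySem.Chars.replace m [' '] []) [','])) =
      (mySplit ';' lf).map (fun m => PySem.List.len (mySplit ',' m)) := by
    apply List.map_congr_left
    intro m hm
    have hnos : m.filter (fun c => !(c == ' ')) = m := by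
      apply List.filter_eq_self.mpr
      intro x hx
      have : x ∈ lf := mem_mySplit_mem ';' lf m hm x hx
      simp only [hlf, List.mem_filter] at this
      exact this.2
    rw [replace_space_eq_filter, hnos, splitOn_eq_mySplit]
  rw [hmap]
  have hB : s.toList.foldl (fun counts c =>
        if c = ';' then counts ++ [1]
        else if c = ',' then bumpLast counts
        else counts) [1] = gRun 1 s.toList := by
    simpa using foldl_step_gRun s.toList [] 1
  rw [hB, ← gRun_filter_space s.toList 1, ← hlf, gRun_eq_split]
  obtain ⟨hh, r, hr⟩ : ∃ hh r, mySplit ';' lf = hh :: r := by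
    cases hm : mySplit ';' lf with
    | nil => exact absurd hm (mySplit_ne_nil ';' lf)
    | cons a b => exact ⟨a, b, rfl⟩
  simp [hr, addFirst]
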